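-- pv_equiv track=rewrite | github.com/MohitS3thi/Travel-Planner | trips/views.py | _feature_intent_label
-- ===== SOURCE A (Python) =====
-- FEATURE_KEYWORDS = {
-- 	'Weather': ['weather', 'forecast', 'rain', 'temperature', 'climate'],
-- 	'Itinerary & Budget': ['itinerary', 'budget', 'activity', 'activities', 'plan'],
-- 	'Map & Places': ['map', 'place', 'places', 'location', 'locations'],
-- 	'Route Planner': ['route', 'routes', 'path', 'directions'],
-- 	'Checklist': ['checklist', 'packing', 'prep', 'to-do', 'todo'],
-- 	'AI Help': ['ai', 'assistant', 'ai help'],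
-- }
--
-- def _feature_intent_label(search_query):
-- 	"""Return a feature label only when query is an explicit feature intent."""
-- 	if not search_query:
-- 		return None
--
-- 	query_text = search_query.strip().lower()
-- 	for feature_label, keywords in FEATURE_KEYWORDS.items():
-- 		if any(query_text == keyword for keyword in keywords):
-- 			return feature_label
-- 	return None
-- ===== SOURCE B (Python) =====
-- # Binary search over an alphabetically sorted keyword table instead of a
-- # nested linear scan of FEATURE_KEYWORDS. Correct because keywords are
-- # unique across labels, so the sorted table contains each key once.
-- _SORTED_KEYWORDS = [
-- 	('activities', 'Itinerary & Budget'),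
-- 	('activity', 'Itinerary & Budget'),
-- 	('ai', 'AI Help'),
-- 	('ai help', 'AI Help'),
-- 	('assistant', 'AI Help'),
-- 	('budget', 'Itinerary & Budget'),
-- 	('checklist', 'Checklist'),
-- 	('climate', 'Weather'),
-- 	('directions', 'Route Planner'),
-- 	('forecast', 'Weather'),
-- 	('itinerary', 'Itinerary & Budget'),
-- 	('location', 'Map & Places'),
-- 	('locations', 'Map & Places'),
-- 	('map', 'Map & Places'),
-- 	('packing', 'Checklist'),
-- 	('path', 'Route Planner'),
-- 	('place', 'Map & Places'),
-- 	('places', 'Map & Places'),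
-- 	('plan', 'Itinerary & Budget'),
-- 	('prep', 'Checklist'),
-- 	('rain', 'Weather'),
-- 	('route', 'Route Planner'),
-- 	('routes', 'Route Planner'),
-- 	('temperature', 'Weather'),
-- 	('to-do', 'Checklist'),
-- 	('todo', 'Checklist'),
-- 	('weather', 'Weather'),
-- ]
--
-- def _feature_intent_label(search_query):
-- 	"""Return a feature label only when query is an explicit feature intent."""
-- 	if not search_query:
-- 		return None
-- 	query_text = search_query.strip().lower()
-- 	lo, hi = 0, len(_SORTED_KEYWORDS)
-- 	while lo < hi:
-- 		mid = (lo + hi) // 2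
-- 		keyword, feature_label = _SORTED_KEYWORDS[mid]
-- 		if keyword == query_text:
-- 			return feature_label
-- 		if keyword < query_text:
-- 			lo = mid + 1
-- 		else:
-- 			hi = mid
-- 	return None
-- ===== Notes on version B (the rewrite author's own statement) =====
-- stated objective: alternative
-- what changed: Replaces A's nested linear scan over FEATURE_KEYWORDS with a binary search over a single alphabetically sorted keyword table (lo/hi halving loop, no scan over labels).
import Mathlib
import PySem

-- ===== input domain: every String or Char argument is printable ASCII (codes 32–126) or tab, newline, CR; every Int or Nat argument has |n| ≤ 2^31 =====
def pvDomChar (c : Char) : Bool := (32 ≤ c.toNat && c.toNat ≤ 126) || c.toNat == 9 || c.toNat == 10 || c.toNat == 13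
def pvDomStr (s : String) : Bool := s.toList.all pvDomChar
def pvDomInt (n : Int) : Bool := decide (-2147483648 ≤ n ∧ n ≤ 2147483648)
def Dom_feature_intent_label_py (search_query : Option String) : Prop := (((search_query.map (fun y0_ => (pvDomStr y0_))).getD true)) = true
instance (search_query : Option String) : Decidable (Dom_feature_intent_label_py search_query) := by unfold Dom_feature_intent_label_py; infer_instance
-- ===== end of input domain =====

-- B replaces A's nested linear scan with a binary search over an alphabetically sorted keyword table. Return-value equivalence.

-- ===== PORT A =====
def FEATURE_KEYWORDS : List (String × List String) :=
  [("Weather", ["weather", "forecast", "rain", "temperature", "climate"]),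
   ("Itinerary & Budget", ["itinerary", "budget", "activity", "activities", "plan"]),
   ("Map & Places", ["map", "place", "places", "location", "locations"]),
   ("Route Planner", ["route", "routes", "path", "directions"]),
   ("Checklist", ["checklist", "packing", "prep", "to-do", "todo"]),
   ("AI Help", ["ai", "assistant", "ai help"])]

-- A's for-loop over FEATURE_KEYWORDS.items(): first label whose keyword list contains the query
def featLoop (query_text : String) : List (String × List String) → Option String
  | [] => none
  | (feature_label, keywords) :: rest =>
      if keywords.any (fun keyword => query_text == keyword) then some feature_label
      else featLoop query_text rest

def feature_intent_label_py (search_query : Option String) : Option String :=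
  match search_query with
  | none => none
  | some s =>
      if s == "" then none
      else featLoop (PySem.Str.lower (PySem.Str.strip s)) FEATURE_KEYWORDS

-- ===== PORT B =====
-- the alphabetically sorted (keyword, label) table from Source B
def SORTED_KEYWORDS : List (String × String) :=
  [("activities", "Itinerary & Budget"), ("activity", "Itinerary & Budget"),
   ("ai", "AI Help"), ("ai help", "AI Help"), ("assistant", "AI Help"),
   ("budget", "Itinerary & Budget"), ("checklist", "Checklist"),
   ("climate", "Weather"), ("directions", "Route Planner"),
   ("forecast", "Weather"), ("itinerary", "Itinerary & Budget"),
   ("location", "Map & Places"), ("locations", "Map & Places"),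
   ("map", "Map & Places"), ("packing", "Checklist"),
   ("path", "Route Planner"), ("place", "Map & Places"),
   ("places", "Map & Places"), ("plan", "Itinerary & Budget"),
   ("prep", "Checklist"), ("rain", "Weather"),
   ("route", "Route Planner"), ("routes", "Route Planner"),
   ("temperature", "Weather"), ("to-do", "Checklist"),
   ("todo", "Checklist"), ("weather", "Weather")]

-- Source B's while-loop, as fuel recursion (fuel only makes totality explicit; called with fuel = hi - lo)
def bsearch (l : List (String × String)) (q : String) (lo hi : Nat) : Nat → Option String
  | 0 => none
  | fuel + 1 =>
      if lo < hi then
        let mid := (lo + hi) / 2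
        let p := l.getD mid ("", "")
        if p.1 == q then some p.2
        else if p.1 < q then bsearch l q (mid + 1) hi fuel
        else bsearch l q lo mid fuel
      else none

def feature_intent_label_py_alt (search_query : Option String) : Option String :=
  match search_query with
  | none => none
  | some s =>
      if s == "" then none
      else bsearch SORTED_KEYWORDS (PySem.Str.lower (PySem.Str.strip s))
             0 SORTED_KEYWORDS.length SORTED_KEYWORDS.length

-- ===== PRECONDITION & SPEC =====
def Spec_feature_intent_label_py (search_query : Option String) (out : Option String) : Prop := out = feature_intent_label_py_alt search_query
instance (search_query : Option String) (out : Option String) : Decidable (Spec_feature_intent_label_py search_query out) := by unfold Spec_feature_intent_label_py; infer_instance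

-- ===== CLAIM (what is proved, stated in full; the proofs are below) =====
def Claim_equal_feature_intent_label_py : Prop := ∀ (search_query : Option String), Dom_feature_intent_label_py search_query → Spec_feature_intent_label_py search_query (feature_intent_label_py search_query)

-- ===== LEMMAS AND PROOFS =====

-- A's loop: success gives an entry containing the query
lemma featLoop_some_mem (q v : String) (fk : List (String × List String))
    (h : featLoop q fk = some v) : ∃ kws, (v, kws) ∈ fk ∧ q ∈ kws := by
  induction fk with
  | nil => simp [featLoop] at h
  | cons hd tl ih =>
      obtain ⟨lbl, kws⟩ := hd
      simp only [featLoop] at h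
      split_ifs at h with hc
      · obtain ⟨kw, hkw, he⟩ := List.any_eq_true.mp hc
        have hv : lbl = v := by injection h
        rw [beq_iff_eq] at he
        exact ⟨kws, by simp [hv], he ▸ hkw⟩
      · obtain ⟨kws', h1, h2⟩ := ih h
        exact ⟨kws', List.mem_cons_of_mem _ h1, h2⟩

-- A's loop: none iff the query occurs in no entry
lemma featLoop_none_iff (q : String) (fk : List (String × List String)) :
    featLoop q fk = none ↔ ∀ lbl kws, (lbl, kws) ∈ fk → q ∉ kws := by
  induction fk with
  | nil => simp [featLoop]
  | cons hd tl ih =>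
      obtain ⟨lbl, kws⟩ := hd
      simp only [featLoop]
      split_ifs with hc
      · obtain ⟨kw, hkw, he⟩ := List.any_eq_true.mp hc
        rw [beq_iff_eq] at he
        simp only [false_iff]
        intro h
        exact h lbl kws (List.mem_cons_self ..) (he ▸ hkw)
      · rw [ih]
        constructor
        · intro h lbl' kws' hm hq
          rcases List.mem_cons.mp hm with he | hm'
          · have h2 : kws' = kws := congrArg Prod.snd he
            have hnk : q ∉ kws := by simpa using hc
            exact hnk (h2 ▸ hq)
          · exact h lbl' kws' hm' hq
        · intro h lbl' kws' hm hq
          exact h lbl' kws' (List.mem_cons_of_mem _ hm) hq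

-- keys of a strictly key-sorted list are injective in the index
lemma sorted_key_inj (l : List (String × String))
    (hs : List.Pairwise (fun a b : String × String => a.1 < b.1) l)
    (i j : Nat) (hi : i < l.length) (hj : j < l.length)
    (h : l[i].1 = l[j].1) : i = j := by
  rcases Nat.lt_trichotomy i j with hij | hij | hij
  · exact absurd h (ne_of_lt ((List.pairwise_iff_getElem.mp hs) i j hi hj hij))
  · exact hij
  · exact absurd h.symm (ne_of_lt ((List.pairwise_iff_getElem.mp hs) j i hj hi hij))

-- binary-search correctness on a strictly key-sorted window
lemma bsearch_some_iff (l : List (String × String))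
    (hs : List.Pairwise (fun a b : String × String => a.1 < b.1) l)
    (q v : String) :
    ∀ (fuel lo hi : Nat), hi ≤ l.length → hi - lo ≤ fuel →
      (bsearch l q lo hi fuel = some v ↔
        ∃ i, lo ≤ i ∧ i < hi ∧ ∃ h : i < l.length, l[i] = (q, v)) := by
  intro fuel
  induction fuel with
  | zero =>
      intro lo hi hlen hf
      simp only [bsearch]
      constructor
      · intro h; exact absurd h (by simp)
      · rintro ⟨i, h1, h2, -⟩; omega
  | succ fuel ih =>
      intro lo hi hlen hf
      simp only [bsearch]
      by_cases hlh : lo < hi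
      · simp only [hlh, if_true]
        set mid := (lo + hi) / 2 with hmid
        have hmlo : lo ≤ mid := by omega
        have hmhi : mid < hi := by omega
        have hml : mid < l.length := by omega
        have hgd : l.getD mid ("", "") = l[mid] := List.getD_eq_getElem l _ hml
        rw [hgd]
        rcases lt_trichotomy (l[mid].1) q with hcmp | hcmp | hcmp
        · -- key below q: search right half
          have hne : (l[mid].1 == q) = false := by
            simp [beq_eq_false_iff_ne]; exact ne_of_lt hcmp
          simp only [hne, Bool.false_eq_true, if_false, hcmp, if_true]
          rw [ih (mid + 1) hi hlen (by omega)]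
          constructor
          · rintro ⟨i, h1, h2, h3⟩; exact ⟨i, by omega, h2, h3⟩
          · rintro ⟨i, h1, h2, hil, h3⟩
            refine ⟨i, ?_, h2, hil, h3⟩
            by_contra hnot
            have hile : i ≤ mid := by omega
            have : l[i].1 ≤ l[mid].1 := by
              rcases Nat.lt_or_ge i mid with h' | h'
              · exact le_of_lt ((List.pairwise_iff_getElem.mp hs) i mid hil hml h')
              · have : i = mid := by omega
                simp [this]
            rw [h3] at this
            exact absurd hcmp (not_lt_of_ge this)
        · -- key equals q
          have heq : (l[mid].1 == q) = true := by simp [hcmp]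
          simp only [heq, if_true]
          constructor
          · intro h
            refine ⟨mid, hmlo, hmhi, hml, ?_⟩
            have : v = l[mid].2 := by simpa using h.symm
            rw [this, ← hcmp]
          · rintro ⟨i, h1, h2, hil, h3⟩
            have hkey : l[i].1 = l[mid].1 := by rw [h3, hcmp]
            have : i = mid := sorted_key_inj l hs i mid hil hml hkey
            subst this
            rw [h3]
        · -- key above q: search left half
          have hne : (l[mid].1 == q) = false := by
            simp [beq_eq_false_iff_ne]; exact (ne_of_lt hcmp).symm
          have hnlt : ¬ (l[mid].1 < q) := not_lt_of_gt hcmp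
          simp only [hne, Bool.false_eq_true, if_false, hnlt]
          rw [ih lo mid (le_of_lt hml) (by omega)]
          constructor
          · rintro ⟨i, h1, h2, h3⟩; exact ⟨i, h1, by omega, h3⟩
          · rintro ⟨i, h1, h2, hil, h3⟩
            refine ⟨i, h1, ?_, hil, h3⟩
            by_contra hnot
            have hige : mid ≤ i := by omega
            have : l[mid].1 ≤ l[i].1 := by
              rcases Nat.lt_or_ge mid i with h' | h'
              · exact le_of_lt ((List.pairwise_iff_getElem.mp hs) mid i hml hil h')
              · have : i = mid := by omega
                simp [this]
            rw [h3] at this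
            exact absurd hcmp (not_lt_of_ge this)
      · simp only [hlh, if_false]
        constructor
        · intro h; exact absurd h (by simp)
        · rintro ⟨i, h1, h2, -⟩; omega

lemma sorted_keywords_pairwise :
    List.Pairwise (fun a b : String × String => a.1 < b.1) SORTED_KEYWORDS := by
  have h : List.Pairwise (fun a b : String × String => a.1.toList < b.1.toList)
      SORTED_KEYWORDS := by decide
  exact h.imp (fun hab => String.lt_iff_toList_lt.mpr hab)

lemma sorted_perm_flat :
    SORTED_KEYWORDS.Perm
      (FEATURE_KEYWORDS.flatMap (fun p => p.2.map (fun kw => (kw, p.1)))) := by decide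

-- full-range binary search = membership in the table
lemma bsearch_full_iff (q v : String) :
    bsearch SORTED_KEYWORDS q 0 SORTED_KEYWORDS.length SORTED_KEYWORDS.length = some v ↔
      (q, v) ∈ SORTED_KEYWORDS := by
  rw [bsearch_some_iff SORTED_KEYWORDS sorted_keywords_pairwise q v
        SORTED_KEYWORDS.length 0 SORTED_KEYWORDS.length le_rfl (by omega)]
  constructor
  · rintro ⟨i, -, -, hil, h3⟩; exact h3 ▸ List.getElem_mem hil
  · intro h
    obtain ⟨i, hil, h3⟩ := List.mem_iff_getElem.mp h
    exact ⟨i, Nat.zero_le i, hil, hil, h3⟩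

-- membership in the flattened table = an entry of FEATURE_KEYWORDS contains the query
lemma mem_flat_iff (q v : String) :
    (q, v) ∈ FEATURE_KEYWORDS.flatMap (fun p => p.2.map (fun kw => (kw, p.1))) ↔
      ∃ kws, (v, kws) ∈ FEATURE_KEYWORDS ∧ q ∈ kws := by
  simp only [List.mem_flatMap, List.mem_map, Prod.mk.injEq]
  constructor
  · rintro ⟨⟨lbl, kws⟩, hm, kw, hkw, rfl, rfl⟩; exact ⟨kws, hm, hkw⟩
  · rintro ⟨kws, hm, hq⟩; exact ⟨(v, kws), hm, q, hq, rfl, rfl⟩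

-- the two lookups agree on every query string
lemma loop_eq_bsearch (q : String) :
    featLoop q FEATURE_KEYWORDS =
      bsearch SORTED_KEYWORDS q 0 SORTED_KEYWORDS.length SORTED_KEYWORDS.length := by
  cases hA : featLoop q FEATURE_KEYWORDS with
  | some v =>
      have hm : ∃ kws, (v, kws) ∈ FEATURE_KEYWORDS ∧ q ∈ kws :=
        featLoop_some_mem q v FEATURE_KEYWORDS hA
      exact ((bsearch_full_iff q v).mpr
        (sorted_perm_flat.mem_iff.mpr ((mem_flat_iff q v).mpr hm))).symm
  | none =>
      cases hB : bsearch SORTED_KEYWORDS q 0 SORTED_KEYWORDS.length SORTED_KEYWORDS.length with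
      | none => rfl
      | some v =>
          obtain ⟨kws, hm, hq⟩ := (mem_flat_iff q v).mp
            (sorted_perm_flat.mem_iff.mp ((bsearch_full_iff q v).mp hB))
          exact absurd hq ((featLoop_none_iff q FEATURE_KEYWORDS).mp hA v kws hm)

-- ===== VERDICT (by name: the statement is the Claim_ definition above) =====
theorem feature_intent_label_py_spec : Claim_equal_feature_intent_label_py := by
  intro search_query _
  unfold Spec_feature_intent_label_py feature_intent_label_py feature_intent_label_py_alt
  cases search_query with
  | none => rfl
  | some s =>
      by_cases h : s == ""
      · simp [h]
      · simp only [h, Bool.false_eq_true, if_false]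
        exact loop_eq_bsearch _
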